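-- pv_equiv track=rewrite | github.com/haloxil/BigDonkey | codeitsuisse/routes/revesle.py | update_knowledge
-- ===== SOURCE A (Python) =====
-- def update_knowledge(space, guess, result):
--     for index,ele in enumerate(result):
--         if ele == "0": #Symbol Not Present
--             for indexi,elei in enumerate(space):
--                 for indexj,elej in enumerate(elei):
--                     space[indexi][indexj] = space[indexi][indexj].replace(guess[index],"")
--
--         elif ele == "1":#Symbol present, but not here
--             for indexi,elei in enumerate(space[index]):
--                 if guess[index] in elei:
--                     space[index][indexi] = space[index][indexi].replace(guess[index],"")
--         elif ele == "2": #THIS IS THE SYMBOL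
--             for indexi,elei in enumerate(space[index]):
--                 if guess[index] in elei:
--                     space[index][indexi] = guess[index]
--                 else:
--                     space[index][indexi] = ""
--     return space
-- ===== SOURCE B (Python) =====
-- def update_knowledge(space, guess, result):
--     # Cell-major rewrite: precompute the '0'-clue characters once, then rewrite
--     # each row in a single pass with a translation table, instead of rescanning
--     # the whole grid for every '0' clue.
--     zeros = [(i, guess[i]) for i, e in enumerate(result) if e == "0"]
--     allz = "".join(c for _, c in zeros)
--     base = str.maketrans("", "", allz)
--     for r, row in enumerate(space):
--         e = result[r] if r < len(result) else ""
--         if e == "2":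
--             c = guess[r]
--             dead = any(ch == c for _, ch in zeros)
--             for j, s in enumerate(row):
--                 row[j] = c if (c in s and not dead) else ""
--         else:
--             table = str.maketrans("", "", allz + guess[r]) if e == "1" else base
--             for j, s in enumerate(row):
--                 row[j] = s.translate(table)
--     return space
-- ===== Notes on version B (the rewrite author's own statement) =====
-- stated objective: alternative
-- what changed: A rescans the entire grid once per '0' clue (and a row per '1'/'2' clue); B precomputes the '0'-clue characters once and rewrites each cell in a single cell-major pass, deciding each cell's final value directly.
-- outside the precondition, e.g. on update_knowledge([[]], '', '2'): A returns [[]], B raises IndexError; on update_knowledge([], '', '0'): A returns [], B raises IndexError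
import Mathlib
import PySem

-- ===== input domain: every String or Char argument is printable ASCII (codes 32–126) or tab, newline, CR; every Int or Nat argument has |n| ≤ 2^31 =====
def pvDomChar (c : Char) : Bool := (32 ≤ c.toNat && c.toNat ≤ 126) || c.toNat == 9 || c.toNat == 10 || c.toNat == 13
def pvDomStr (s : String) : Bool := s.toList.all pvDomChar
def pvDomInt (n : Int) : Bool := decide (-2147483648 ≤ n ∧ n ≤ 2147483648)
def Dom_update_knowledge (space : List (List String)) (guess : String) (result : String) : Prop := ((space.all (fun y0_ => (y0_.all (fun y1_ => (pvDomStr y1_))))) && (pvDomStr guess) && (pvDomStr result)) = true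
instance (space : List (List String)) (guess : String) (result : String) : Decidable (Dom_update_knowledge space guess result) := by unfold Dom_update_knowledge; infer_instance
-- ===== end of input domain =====

-- B rewrites the Wordle-grid pruning cell-major with the '0'-clue characters precomputed once,
-- instead of A's rescan of the whole grid for every '0' clue; equivalence is about the RETURN value
-- (both Pythons also mutate `space` in place, writing the same cell values).

-- guess[i] (a 1-char string in Python, a Char here); under Pre_ the index is always in range
def pvGch (guess : String) (i : Int) : Char := (PySem.Str.pyGet? guess i).getD ' '

-- s.replace(c, "")
def pvRep (s : String) (c : Char) : String := PySem.Str.replace s (String.ofList [c]) ""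

-- ===== PORT A =====
def update_knowledge (space : List (List String)) (guess : String) (result : String) : List (List String) :=
  (PySem.List.enumerate result.toList).foldl (fun sp ie =>
    if ie.2 = '0' then
      sp.map (fun row => row.map (fun s => pvRep s (pvGch guess ie.1)))
    else if ie.2 = '1' then
      sp.modify ie.1.toNat (fun row => row.map (fun s =>
        if PySem.Str.isIn (String.ofList [pvGch guess ie.1]) s then pvRep s (pvGch guess ie.1) else s))
    else if ie.2 = '2' then
      sp.modify ie.1.toNat (fun row => row.map (fun s =>
        if PySem.Str.isIn (String.ofList [pvGch guess ie.1]) s then String.ofList [pvGch guess ie.1] else ""))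
    else sp) space

-- ===== PORT B =====
def update_knowledge_alt (space : List (List String)) (guess : String) (result : String) : List (List String) :=
  -- zeros = [(i, guess[i]) for i, e in enumerate(result) if e == "0"]
  let zeros : List (Int × Char) :=
    (PySem.List.enumerate result.toList).foldl
      (fun acc ie => if ie.2 = '0' then acc ++ [(ie.1, pvGch guess ie.1)] else acc) []
  -- allz = "".join(c for _, c in zeros)
  let allz : List Char := zeros.map (fun p => p.2)
  (PySem.List.enumerate space).map (fun rrow =>
    let r := rrow.1
    -- e = result[r] if r < len(result) else ""
    let e : Option Char := if r < PySem.Str.len result then PySem.Str.pyGet? result r else none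
    if e = some '2' then
      let c := pvGch guess r
      let dead := zeros.any (fun p => p.2 == c)
      rrow.2.map (fun s => if PySem.Str.isIn (String.ofList [c]) s && !dead then String.ofList [c] else "")
    else
      -- table = str.maketrans("", "", dels); s.translate(table) removes every char of dels:
      -- ported by hand as a filter over the cell's characters (exact)
      let dels : List Char := if e = some '1' then allz ++ [pvGch guess r] else allz
      rrow.2.map (fun s => String.ofList (s.toList.filter (fun ch => !(dels.contains ch)))))

-- ===== PRECONDITION & SPEC =====
-- Pre_ excludes inputs where some clue position i has result[i] in "012" with i out of range of
-- guess, or result[i] in "12" with i out of range of space: there Python A raises IndexError,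
-- except in degenerate cases where the grid rows reaching the bad index are empty (or the grid has
-- no cells at all), so the offending subscript is never evaluated and A returns space unchanged
-- while B (which precomputes guess[i] for every clue) cannot avoid the IndexError.
def Pre_update_knowledge (space : List (List String)) (guess : String) (result : String) : Prop :=
  ∀ p ∈ PySem.List.enumerate result.toList,
    ((p.2 = '0' ∨ p.2 = '1' ∨ p.2 = '2') → p.1 < PySem.Str.len guess) ∧
    ((p.2 = '1' ∨ p.2 = '2') → p.1 < (space.length : Int))
instance (space : List (List String)) (guess : String) (result : String) : Decidable (Pre_update_knowledge space guess result) := by unfold Pre_update_knowledge; infer_instance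

def pvWitness_update_knowledge : List (List String) × String × String := ([["ab", "c"], ["b"]], "ab", "01")

def Spec_update_knowledge (space : List (List String)) (guess : String) (result : String) (out : List (List String)) : Prop := out = update_knowledge_alt space guess result
instance (space : List (List String)) (guess : String) (result : String) (out : List (List String)) : Decidable (Spec_update_knowledge space guess result out) := by unfold Spec_update_knowledge; infer_instance

-- ===== CLAIM (what is proved, stated in full; the proofs are below) =====
def Claim_equal_update_knowledge : Prop := ∀ (space : List (List String)) (guess : String) (result : String), Dom_update_knowledge space guess result → Pre_update_knowledge space guess result → Spec_update_knowledge space guess result (update_knowledge space guess result)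

-- ===== LEMMAS AND PROOFS =====

-- A's per-cell action of the clue (i, e) at row r, list-of-chars level
def pvCell (guess : String) (r : Nat) (s : List Char) (ie : Int × Char) : List Char :=
  if ie.2 = '0' then s.filter (· ≠ pvGch guess ie.1)
  else if ie.2 = '1' then
    (if ie.1.toNat = r then s.filter (· ≠ pvGch guess ie.1) else s)
  else if ie.2 = '2' then
    (if ie.1.toNat = r then (if pvGch guess ie.1 ∈ s then [pvGch guess ie.1] else []) else s)
  else s

-- A's per-cell action, string level (exactly the cell assignment of each branch of A)
def pvCellA (guess : String) (r : Nat) (s : String) (ie : Int × Char) : String :=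
  if ie.2 = '0' then pvRep s (pvGch guess ie.1)
  else if ie.2 = '1' then
    (if ie.1.toNat = r then
      (if PySem.Str.isIn (String.ofList [pvGch guess ie.1]) s then pvRep s (pvGch guess ie.1) else s)
     else s)
  else if ie.2 = '2' then
    (if ie.1.toNat = r then
      (if PySem.Str.isIn (String.ofList [pvGch guess ie.1]) s then String.ofList [pvGch guess ie.1] else "")
     else s)
  else s

-- the characters guess[i] of the '0' clues of l = result[k:]
def pvZ (guess : String) (l : List Char) (k : Nat) : List Char :=
  match l with
  | [] => []
  | e :: t => (if e = '0' then [pvGch guess (k : Int)] else []) ++ pvZ guess t (k + 1)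

-- closed form of folding all clue actions of l = result[k:] over one cell of row r
def pvF (guess : String) (r : Nat) (l : List Char) (k : Nat) (s : List Char) : List Char :=
  if k ≤ r ∧ l[r - k]? = some '2' then
    (if pvGch guess (r : Int) ∈ s ∧ pvGch guess (r : Int) ∉ pvZ guess l k then [pvGch guess (r : Int)] else [])
  else
    s.filter (fun ch => ch ∉ pvZ guess l k ∧ ¬(k ≤ r ∧ l[r - k]? = some '1' ∧ ch = pvGch guess (r : Int)))

-- generic list lemmas used to normalise both ports
theorem pv_mapIdx_id {α : Type} (l : List α) : l.mapIdx (fun _ x => x) = l := by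
  induction l with
  | nil => rfl
  | cons x xs ih => simp [List.mapIdx_cons, ih]

theorem pv_modify_mapIdx {α : Type} (l : List α) (i : Nat) (f : α → α) :
    l.modify i f = l.mapIdx (fun j x => if j = i then f x else x) := by
  induction l generalizing i with
  | nil => simp
  | cons x xs ih =>
    cases i with
    | zero =>
      simp only [List.modify, List.mapIdx_cons]
      simp [pv_mapIdx_id]
    | succ n =>
      have h : (x :: xs).modify (n + 1) f = x :: xs.modify n f := by simp [List.modify]
      rw [h, List.mapIdx_cons, ih]
      simp

theorem pv_mapIdx_ext {α β : Type} (l : List α) (f g : Nat → α → β) (h : ∀ i x, f i x = g i x) :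
    l.mapIdx f = l.mapIdx g := by
  induction l generalizing f g with
  | nil => rfl
  | cons x xs ih =>
    simp only [List.mapIdx_cons, h, ih (fun i => f (i + 1)) (fun i => g (i + 1)) (fun i x => h _ x)]

theorem pv_map_eq_mapIdx {α β : Type} (l : List α) (f : α → β) :
    l.map f = l.mapIdx (fun _ x => f x) := by
  induction l with
  | nil => rfl
  | cons x xs ih => simp [List.mapIdx_cons, ih]

theorem pv_foldl_mapIdx {α β : Type} (L : List β) (F : Nat → α → β → α) : ∀ (sp : List α),
    L.foldl (fun sp op => sp.mapIdx (fun i x => F i x op)) sp = sp.mapIdx (fun i x => L.foldl (F i) x) := by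
  induction L with
  | nil => intro sp; simp [pv_mapIdx_id]
  | cons op L ih =>
    intro sp
    simp only [List.foldl_cons, ih, List.mapIdx_mapIdx]
    rfl

theorem pv_foldl_map {α β : Type} (L : List β) (C : α → β → α) : ∀ (row : List α),
    L.foldl (fun row op => row.map (fun s => C s op)) row = row.map (fun s => L.foldl C s) := by
  induction L with
  | nil => intro row; simp
  | cons op L ih => intro row; simp only [List.foldl_cons, ih, List.map_map]; rfl

-- Python's s.replace(c, "") for a single character is a filter
theorem pv_replace_go_filter (c : Char) : ∀ (l : List Char) (fuel : Nat) (acc : List Char), l.length ≤ fuel →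
    PySem.Chars.replace.go [c] [] fuel l acc = acc.reverse ++ l.filter (· ≠ c) := by
  intro l
  induction l with
  | nil =>
    intro fuel acc h
    cases fuel <;> simp [PySem.Chars.replace.go]
  | cons x t ih =>
    intro fuel acc h
    cases fuel with
    | zero => simp at h
    | succ n =>
      by_cases hx : x = c
      · have hp : List.isPrefixOf [c] (x :: t) = true := by simp [List.isPrefixOf, hx]
        simp only [PySem.Chars.replace.go, hp, if_pos, List.length_cons, List.length_nil,
          List.drop_succ_cons, List.drop_zero, List.reverse_nil, List.nil_append]
        rw [ih n acc (by simpa using h)]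
        simp [hx]
      · have hp : List.isPrefixOf [c] (x :: t) = false := by
          simp [List.isPrefixOf]
          exact fun hc => absurd hc.symm hx
        simp only [PySem.Chars.replace.go, hp, Bool.false_eq_true, if_false]
        rw [ih n (x :: acc) (by simpa using h)]
        simp [hx]

theorem pv_replace_filter (s : List Char) (c : Char) :
    PySem.Chars.replace s [c] [] = s.filter (· ≠ c) := by
  simp only [PySem.Chars.replace]
  simp [pv_replace_go_filter c s s.length [] le_rfl]

theorem pv_rep_toList (s : String) (c : Char) : (pvRep s c).toList = s.toList.filter (· ≠ c) := by
  simp [pvRep, PySem.Str.toList_replace, pv_replace_filter]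

-- Python's (c in s) for a single character c is list membership
theorem pv_isIn_singleton (c : Char) (l : List Char) :
    PySem.Chars.isIn [c] l = (c ∈ l : Bool) := by
  rcases hm : (c ∈ l : Bool) with _ | _
  · simp only [decide_eq_false_iff_not] at hm
    rcases h : PySem.Chars.isIn [c] l with _ | _
    · rfl
    · exact absurd (((PySem.Chars.isIn_iff_infix [c] l).mp h).mem (by simp)) hm
  · simp only [decide_eq_true_eq] at hm
    apply (PySem.Chars.isIn_iff_infix [c] l).mpr
    obtain ⟨u, v, huv⟩ := List.append_of_mem hm
    exact ⟨u, v, by simp [huv]⟩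

theorem pv_cellA_toList (guess : String) (r : Nat) (s : String) (ie : Int × Char) :
    (pvCellA guess r s ie).toList = pvCell guess r s.toList ie := by
  unfold pvCellA pvCell
  by_cases h0 : ie.2 = '0'
  · simp [h0, pv_rep_toList]
  by_cases h1 : ie.2 = '1'
  · by_cases hr : ie.1.toNat = r
    · by_cases hm : pvGch guess ie.1 ∈ s.toList
      · simp [h0, h1, hr, pv_isIn_singleton, hm, pv_rep_toList]
      · rw [if_neg h0, if_neg h0, if_pos h1, if_pos h1, if_pos hr, if_pos hr]
        rw [if_neg (by simp [pv_isIn_singleton, hm])]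
        exact (List.filter_eq_self.mpr (by intro a ha; simp; rintro rfl; exact hm ha)).symm
    · simp [h0, h1, hr]
  by_cases h2 : ie.2 = '2'
  · by_cases hr : ie.1.toNat = r
    · by_cases hm : pvGch guess ie.1 ∈ s.toList
      · simp [h0, h1, h2, hr, pv_isIn_singleton, hm]
      · simp [h0, h1, h2, hr, pv_isIn_singleton, hm]
    · simp [h0, h1, h2, hr]
  · simp [h0, h1, h2]

theorem pv_guard_shift (e : Char) (t : List Char) (r k : Nat) (x : Char) :
    (k ≤ r ∧ (e :: t)[r - k]? = some x) ↔ ((k = r ∧ e = x) ∨ (k + 1 ≤ r ∧ t[r - (k + 1)]? = some x)) := by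
  constructor
  · rintro ⟨hk, hx⟩
    by_cases hkr : k = r
    · subst hkr; simp at hx; exact Or.inl ⟨rfl, hx⟩
    · refine Or.inr ⟨by omega, ?_⟩
      have hrk : r - k = (r - (k + 1)) + 1 := by omega
      rw [hrk] at hx; simpa using hx
  · rintro (⟨rfl, rfl⟩ | ⟨hk, hx⟩)
    · simp
    · refine ⟨by omega, ?_⟩
      have hrk : r - k = (r - (k + 1)) + 1 := by omega
      rw [hrk]; simpa using hx

theorem pv_main (guess : String) (r : Nat) : ∀ (l : List Char) (k : Nat) (s : List Char),
    (PySem.List.enumerate l (k : Int)).foldl (pvCell guess r) s = pvF guess r l k s := by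
  intro l
  induction l with
  | nil => intro k s; simp [PySem.List.enumerate_nil, pvF, pvZ]
  | cons e t ih =>
    intro k s
    rw [PySem.List.enumerate_cons, List.foldl_cons]
    have hcast : ((k : Int) + 1) = ((k + 1 : Nat) : Int) := by push_cast; ring
    rw [hcast, ih (k + 1)]
    by_cases he0 : e = '0'
    · -- '0' clue: removes pvGch guess k from every cell
      have hcell : pvCell guess r s ((k : Int), e) = s.filter (· ≠ pvGch guess (k : Int)) := by
        simp [pvCell, he0]
      rw [hcell]
      have hz : pvZ guess (e :: t) k = pvGch guess (k : Int) :: pvZ guess t (k + 1) := by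
        simp [pvZ, he0]
      have hG2 : (k ≤ r ∧ (e :: t)[r - k]? = some '2') ↔ (k + 1 ≤ r ∧ t[r - (k + 1)]? = some '2') := by
        rw [pv_guard_shift]
        constructor
        · rintro (⟨_, rfl⟩ | h)
          · simp at he0
          · exact h
        · exact Or.inr
      have hG1 : (k ≤ r ∧ (e :: t)[r - k]? = some '1') ↔ (k + 1 ≤ r ∧ t[r - (k + 1)]? = some '1') := by
        rw [pv_guard_shift]
        constructor
        · rintro (⟨_, rfl⟩ | h)
          · simp at he0
          · exact h
        · exact Or.inr
      unfold pvF
      by_cases hg : k + 1 ≤ r ∧ t[r - (k + 1)]? = some '2'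
      · rw [if_pos hg, if_pos (hG2.mpr hg)]
        refine if_congr ?_ rfl rfl
        simp only [hz, List.mem_filter, List.mem_cons, decide_eq_true_eq]
        tauto
      · rw [if_neg hg, if_neg (fun h => hg (hG2.mp h)), List.filter_filter]
        refine List.filter_congr ?_
        intro a _
        simp only [← Bool.decide_and, decide_eq_decide, hz, List.mem_cons, ← and_assoc, hG1]
        tauto
    · -- head clue is not '0'
      have hz : pvZ guess (e :: t) k = pvZ guess t (k + 1) := by simp [pvZ, he0]
      by_cases hkr : k = r
      · subst hkr
        by_cases he1 : e = '1'
        · -- '1' clue on this very row: remove the char from every cell of the row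
          have hcell : pvCell guess k s ((k : Int), e) = s.filter (· ≠ pvGch guess (k : Int)) := by
            simp [pvCell, he0, he1]
          rw [hcell]
          unfold pvF
          rw [if_neg (fun h => absurd h.1 (by omega)), if_neg (by simp [he1]), List.filter_filter]
          refine List.filter_congr ?_
          intro a _
          simp only [← Bool.decide_and, decide_eq_decide, hz, he1]
          constructor
          · rintro ⟨⟨h1, _⟩, h2⟩
            exact ⟨h1, by push_neg; intro _ _; simpa using fun h => h2 h⟩
          · rintro ⟨h1, h2⟩
            push_neg at h2
            refine ⟨⟨h1, by push_neg; intro h; omega⟩, ?_⟩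
            intro ha
            exact (h2 le_rfl (by simp) ) ha
        · by_cases he2 : e = '2'
          · -- '2' clue on this very row
            have hcell : pvCell guess k s ((k : Int), e) =
                (if pvGch guess (k : Int) ∈ s then [pvGch guess (k : Int)] else []) := by
              simp [pvCell, he0, he1, he2]
            rw [hcell]
            unfold pvF
            have hga : ¬(k + 1 ≤ k ∧ t[k - (k + 1)]? = some '2') := fun h => absurd h.1 (by omega)
            have hgb : (k ≤ k ∧ (e :: t)[k - k]? = some '2') := ⟨le_rfl, by simp [he2]⟩
            rw [if_neg hga, if_pos hgb]
            simp only [hz]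
            by_cases hm : pvGch guess (k : Int) ∈ s
            · rw [if_pos hm]
              by_cases hzk : pvGch guess (k : Int) ∈ pvZ guess t (k + 1)
              · rw [if_neg (fun h => h.2 hzk)]
                simp [hzk]
              · rw [if_pos ⟨hm, hzk⟩]
                simp [hzk]
                try omega
            · rw [if_neg hm, if_neg (fun h => hm h.1)]
              simp
          · -- some other clue character on this row: no action
            have hcell : pvCell guess k s ((k : Int), e) = s := by
              simp [pvCell, he0, he1, he2]
            rw [hcell]
            unfold pvF
            have hg2 : ¬(k ≤ k ∧ (e :: t)[k - k]? = some '2') := by simp [he2]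
            have hg2t : ¬(k + 1 ≤ k ∧ t[k - (k + 1)]? = some '2') := fun h => absurd h.1 (by omega)
            rw [if_neg hg2t, if_neg hg2]
            refine List.filter_congr ?_
            intro a _
            simp only [decide_eq_decide, hz, he1]
            constructor
            · rintro ⟨h1, _⟩
              exact ⟨h1, by simp [he1]⟩
            · rintro ⟨h1, _⟩
              exact ⟨h1, by push_neg; intro h; omega⟩
      · -- a clue for another row: no action on row r
        have hcell : pvCell guess r s ((k : Int), e) = s := by
          simp [pvCell, he0, hkr]
        rw [hcell]
        have hG : ∀ x : Char, x ≠ '0' → ((k ≤ r ∧ (e :: t)[r - k]? = some x) ↔ (k + 1 ≤ r ∧ t[r - (k + 1)]? = some x)) := by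
          intro x _
          rw [pv_guard_shift]
          constructor
          · rintro (⟨h, _⟩ | h)
            · exact absurd h hkr
            · exact h
          · exact Or.inr
        unfold pvF
        by_cases hg : k + 1 ≤ r ∧ t[r - (k + 1)]? = some '2'
        · rw [if_pos hg, if_pos ((hG '2' (by decide)).mpr hg)]
          simp [hz]
        · rw [if_neg hg, if_neg (fun h => hg ((hG '2' (by decide)).mp h))]
          refine List.filter_congr ?_
          intro a _
          simp only [decide_eq_decide, hz, ← and_assoc, hG '1' (by decide)]

theorem pv_foldl_cell_str (guess : String) (r : Nat) : ∀ (L : List (Int × Char)) (s : String),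
    L.foldl (pvCellA guess r) s = String.ofList (L.foldl (pvCell guess r) s.toList) := by
  intro L
  induction L with
  | nil => intro s; simp
  | cons op L ih =>
    intro s
    rw [List.foldl_cons, List.foldl_cons, ih, pv_cellA_toList]

theorem pv_zeros_eq (guess : String) : ∀ (l : List Char) (k : Nat),
    ((PySem.List.enumerate l (k : Int)).filter (fun p => decide (p.2 = '0'))).map (fun p => pvGch guess p.1)
      = pvZ guess l k := by
  intro l
  induction l with
  | nil => intro k; simp [PySem.List.enumerate_nil, pvZ]
  | cons e t ih =>
    intro k
    rw [PySem.List.enumerate_cons, List.filter_cons]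
    have hcast : ((k : Int) + 1) = ((k + 1 : Nat) : Int) := by push_cast; ring
    have hzc : pvZ guess (e :: t) k = (if e = '0' then [pvGch guess (k : Int)] else []) ++ pvZ guess t (k + 1) := rfl
    rw [hzc, hcast, ← ih (k + 1)]
    by_cases he : e = '0'
    · simp [he]
    · simp [he]

theorem pv_enum_map {α β : Type} (f : Int × α → β) : ∀ (xs : List α) (k : Nat),
    (PySem.List.enumerate xs (k : Int)).map f = xs.mapIdx (fun i x => f (((k + i : Nat) : Int), x)) := by
  intro xs
  induction xs with
  | nil => intro k; simp [PySem.List.enumerate_nil]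
  | cons x xs ih =>
    intro k
    rw [PySem.List.enumerate_cons]
    have hcast : ((k : Int) + 1) = ((k + 1 : Nat) : Int) := by push_cast; ring
    rw [List.map_cons, hcast, ih (k + 1), List.mapIdx_cons]
    refine congrArg₂ List.cons ?_ ?_
    · norm_num
    · apply pv_mapIdx_ext
      intro i y
      have h2 : k + 1 + i = k + (i + 1) := by omega
      rw [h2]

theorem pv_contains_eq (l : List Char) (c : Char) : l.contains c = (c ∈ l : Bool) := by
  simp [List.contains_iff_mem]

theorem pv_e_eq (s : String) (r : Nat) :
    (if (r : Int) < PySem.Str.len s then PySem.Str.pyGet? s (r : Int) else none) = s.toList[r]? := by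
  rw [PySem.Str.len_eq]
  by_cases hr : r < s.toList.length
  · rw [if_pos (by exact_mod_cast hr)]
    simp
  · rw [if_neg (by exact_mod_cast hr)]
    rw [List.getElem?_eq_none (by omega)]


-- A's port in normal form
theorem pv_A_norm (space : List (List String)) (guess : String) (result : String) :
    update_knowledge space guess result =
      space.mapIdx (fun r row => row.map (fun s => String.ofList (pvF guess r result.toList 0 s.toList))) := by
  unfold update_knowledge
  have hstep : (fun (sp : List (List String)) (ie : Int × Char) =>
      if ie.2 = '0' then
        sp.map (fun row => row.map (fun s => pvRep s (pvGch guess ie.1)))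
      else if ie.2 = '1' then
        sp.modify ie.1.toNat (fun row => row.map (fun s =>
          if PySem.Str.isIn (String.ofList [pvGch guess ie.1]) s then pvRep s (pvGch guess ie.1) else s))
      else if ie.2 = '2' then
        sp.modify ie.1.toNat (fun row => row.map (fun s =>
          if PySem.Str.isIn (String.ofList [pvGch guess ie.1]) s then String.ofList [pvGch guess ie.1] else ""))
      else sp) =
      (fun sp ie => sp.mapIdx (fun r row => row.map (fun s => pvCellA guess r s ie))) := by
    funext sp ie
    by_cases h0 : ie.2 = '0'
    · rw [if_pos h0, pv_map_eq_mapIdx]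
      apply pv_mapIdx_ext
      intro r row
      simp only [pvCellA, h0, if_pos]
    · by_cases h1 : ie.2 = '1'
      · rw [if_neg h0, if_pos h1, pv_modify_mapIdx]
        apply pv_mapIdx_ext
        intro r row
        by_cases hr : r = ie.1.toNat
        · simp [pvCellA, h0, h1, hr]
        · have hrr : ¬ ie.1.toNat = r := fun h => hr h.symm
          simp [pvCellA, h0, h1, hr, hrr]
      · by_cases h2 : ie.2 = '2'
        · rw [if_neg h0, if_neg h1, if_pos h2, pv_modify_mapIdx]
          apply pv_mapIdx_ext
          intro r row
          by_cases hr : r = ie.1.toNat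
          · simp [pvCellA, h0, h1, h2, hr]
          · have hrr : ¬ ie.1.toNat = r := fun h => hr h.symm
            simp [pvCellA, h0, h1, h2, hr, hrr]
        · rw [if_neg h0, if_neg h1, if_neg h2]
          have : sp.mapIdx (fun r row => row.map (fun s => pvCellA guess r s ie)) =
              sp.mapIdx (fun _ row => row) := by
            apply pv_mapIdx_ext
            intro r row
            simp [pvCellA, h0, h1, h2]
          rw [this, pv_mapIdx_id]
  rw [hstep, pv_foldl_mapIdx]
  apply pv_mapIdx_ext
  intro r row
  rw [pv_foldl_map]
  have hcell : (fun (s : String) => (PySem.List.enumerate result.toList 0).foldl (pvCellA guess r) s) =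
      (fun s => String.ofList (pvF guess r result.toList 0 s.toList)) := by
    funext s
    rw [pv_foldl_cell_str]
    have h0 : (0 : Int) = ((0 : Nat) : Int) := by norm_num
    rw [h0, pv_main]
  rw [hcell]

-- B's port in normal form
theorem pv_B_norm (space : List (List String)) (guess : String) (result : String) :
    update_knowledge_alt space guess result =
      space.mapIdx (fun r row => row.map (fun s => String.ofList (pvF guess r result.toList 0 s.toList))) := by
  unfold update_knowledge_alt
  simp only [PySem.List.foldl_append_ite (fun (ie : Int × Char) => ie.2 = '0')
    (fun (ie : Int × Char) => (ie.1, pvGch guess ie.1)), List.nil_append]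
  have h00 : (0 : Int) = ((0 : Nat) : Int) := by norm_num
  rw [h00, pv_enum_map]
  apply pv_mapIdx_ext
  intro r row
  simp only [Nat.zero_add]
  have hzmap : List.map (fun x => x.2) (List.map (fun (ie : Int × Char) => (ie.1, pvGch guess ie.1))
      (List.filter (fun x => decide (x.2 = '0')) (PySem.List.enumerate result.toList ((0 : Nat) : Int))))
      = pvZ guess result.toList 0 := by
    rw [List.map_map]
    exact pv_zeros_eq guess result.toList 0
  rw [pv_e_eq result r]
  by_cases hR2 : result.toList[r]? = some '2'
  · rw [if_pos hR2]
    apply List.map_congr_left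
    intro s _
    have hdead : (List.map (fun (ie : Int × Char) => (ie.1, pvGch guess ie.1))
        (List.filter (fun x => decide (x.2 = '0')) (PySem.List.enumerate result.toList ((0 : Nat) : Int)))).any
        (fun p => p.2 == pvGch guess (r : Int)) = (pvGch guess (r : Int) ∈ pvZ guess result.toList 0 : Bool) := by
      rw [← hzmap, Bool.eq_iff_iff]
      simp only [List.any_eq_true, List.mem_map, beq_iff_eq, decide_eq_true_eq]
    rw [hdead]
    have hisIn : PySem.Str.isIn (String.ofList [pvGch guess (r : Int)]) s
        = (pvGch guess (r : Int) ∈ s.toList : Bool) := by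
      rw [PySem.Str.isIn_eq]
      simp [pv_isIn_singleton]
    rw [hisIn]
    have hF : pvF guess r result.toList 0 s.toList =
        (if pvGch guess (r : Int) ∈ s.toList ∧ pvGch guess (r : Int) ∉ pvZ guess result.toList 0
         then [pvGch guess (r : Int)] else []) := by
      unfold pvF
      rw [if_pos ⟨Nat.zero_le r, by simpa using hR2⟩]
    rw [hF]
    by_cases hc : pvGch guess (r : Int) ∈ s.toList <;>
      by_cases hd : pvGch guess (r : Int) ∈ pvZ guess result.toList 0 <;>
        simp [hc, hd]
  · rw [if_neg hR2]
    apply List.map_congr_left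
    intro s _
    congr 1
    have hF : pvF guess r result.toList 0 s.toList =
        s.toList.filter (fun ch => decide (ch ∉ pvZ guess result.toList 0 ∧
          ¬(0 ≤ r ∧ result.toList[r - 0]? = some '1' ∧ ch = pvGch guess (r : Int)))) := by
      unfold pvF
      exact if_neg (fun h => hR2 (by simpa using h.2))
    rw [hF]
    refine List.filter_congr ?_
    intro ch _
    by_cases hR1 : result.toList[r]? = some '1'
    · rw [if_pos hR1, hzmap]
      rw [Bool.eq_iff_iff]
      simp [hR1, pv_contains_eq, List.mem_append]
    · rw [if_neg hR1, hzmap]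
      rw [Bool.eq_iff_iff]
      simp [hR1, pv_contains_eq]

-- ===== VERDICT (by name: the statement is the Claim_ definition above) =====
theorem update_knowledge_spec : Claim_equal_update_knowledge := by
  intro space guess result _ _
  unfold Spec_update_knowledge
  rw [pv_A_norm, pv_B_norm]
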